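-- pv_equiv track=rewrite | github.com/mattiranta/project-euler | Python/30_39/35/main.py | permute_cyclically
-- ===== SOURCE A (Python) =====
-- def permute_cyclically(string):
--     l= []
--     l.append(string)
--     string1 = ''
--     for i in range(0,len(string)-1,1):
--         string1 = string[1:len(string)] + string[:1]
--         l.append(string1)
--         string = string1
--
--     return l
-- ===== SOURCE B (Python) =====
-- def permute_cyclically(string):
--     return [string[i:] + string[:i] for i in range(len(string) or 1)]
-- ===== Notes on version B (the rewrite author's own statement) =====
-- stated objective: simpler
-- what changed: B computes each rotation directly from the original string by index slicing (string[i:] + string[:i]) in one comprehension, instead of threading a running rotation through an accumulator loop and appending to a list.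
import Mathlib
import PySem

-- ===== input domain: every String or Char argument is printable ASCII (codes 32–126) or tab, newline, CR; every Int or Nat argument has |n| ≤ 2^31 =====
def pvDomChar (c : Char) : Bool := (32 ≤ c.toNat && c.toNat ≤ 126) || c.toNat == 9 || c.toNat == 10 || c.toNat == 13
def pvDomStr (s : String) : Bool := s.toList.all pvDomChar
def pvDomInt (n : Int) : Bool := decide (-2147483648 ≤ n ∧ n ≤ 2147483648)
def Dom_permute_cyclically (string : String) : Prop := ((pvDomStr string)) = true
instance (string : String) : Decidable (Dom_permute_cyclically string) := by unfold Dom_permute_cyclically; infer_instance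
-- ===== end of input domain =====

-- B replaces A's accumulator loop (each rotation derived from the previous one) by computing
-- each rotation directly from the original string by index slicing; same cost, simpler.


-- ===== PORT A =====
-- l = [string]; for i in range(0, len(string)-1, 1): string1 = string[1:len(string)] + string[:1]; l.append(string1); string = string1
def permute_cyclically (string : String) : List String :=
  let l : List String := [string]
  let st :=
    (PySem.List.pyRange 0 (PySem.Str.len string - 1) 1).foldl
      (fun (st : List String × String) _ =>
        let s := st.2
        let string1 := String.ofList
          (PySem.Chars.slice s.toList (some 1) (some (PySem.Str.len s)) ++
           PySem.Chars.slice s.toList none (some 1))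
        (st.1 ++ [string1], string1))
      (l, string)
  st.1

-- ===== PORT B =====
-- [string[i:] + string[:i] for i in range(len(string) or 1)]
def permute_cyclically_alt (string : String) : List String :=
  let n := PySem.Str.len string
  (PySem.List.pyRange 0 (if n = 0 then 1 else n) 1).map
    (fun i => String.ofList
      (PySem.Chars.slice string.toList (some i) none ++
       PySem.Chars.slice string.toList none (some i)))

-- ===== PRECONDITION & SPEC =====
def Spec_permute_cyclically (string : String) (out : List String) : Prop := out = permute_cyclically_alt string
instance (string : String) (out : List String) : Decidable (Spec_permute_cyclically string out) := by unfold Spec_permute_cyclically; infer_instance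

-- ===== CLAIM (what is proved, stated in full; the proofs are below) =====
def Claim_equal_permute_cyclically : Prop := ∀ (string : String), Dom_permute_cyclically string → Spec_permute_cyclically string (permute_cyclically string)

-- ===== LEMMAS AND PROOFS =====

/-- The rotation of `cs` by `k` places. -/
def pvRot (cs : List Char) (k : Nat) : List Char := cs.drop k ++ cs.take k

/-- One step of A's loop sends rotation `k` to rotation `k+1` (for `k < length`). -/
lemma pvRot_step (cs : List Char) (k : Nat) (h : k < cs.length) :
    (pvRot cs k).drop 1 ++ (pvRot cs k).take 1 = pvRot cs (k + 1) := by
  unfold pvRot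
  rw [List.drop_eq_getElem_cons h, List.cons_append,
    List.drop_succ_cons, List.drop_zero, List.take_succ_cons, List.take_zero,
    List.append_assoc]
  congr 1
  exact List.take_append_getElem h

/-- A's slice expression applied to a string whose chars are rotation `k` yields rotation `k+1`. -/
lemma pvStep_eq (cs : List Char) (k : Nat) (h : k < cs.length) (s : String)
    (hs : s.toList = pvRot cs k) :
    PySem.Chars.slice s.toList (some 1) (some (s.toList.length : Int)) ++
      PySem.Chars.slice s.toList none (some 1) = pvRot cs (k + 1) := by
  rw [hs]
  rw [PySem.Chars.slice_eq_listSlice, PySem.Chars.slice_eq_listSlice]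
  rw [PySem.List.slice_toNat _ (by norm_num) (by positivity)]
  rw [PySem.List.slice_to _ (by norm_num)]
  rw [Int.toNat_one, Int.toNat_natCast]
  rw [List.take_of_length_le (by rw [List.length_drop])]
  exact pvRot_step cs k h

/-- Loop invariant for A's fold: only the length of the folded range matters. -/
lemma pvLoop :
    ∀ (r : List Int) (cs : List Char) (k : Nat) (acc : List String),
      k + r.length ≤ cs.length →
      (r.foldl
        (fun (st : List String × String) (_ : Int) =>
          (st.1 ++ [String.ofList
              (PySem.Chars.slice st.2.toList (some 1) (some (st.2.toList.length : Int)) ++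
               PySem.Chars.slice st.2.toList none (some 1))],
           String.ofList
              (PySem.Chars.slice st.2.toList (some 1) (some (st.2.toList.length : Int)) ++
               PySem.Chars.slice st.2.toList none (some 1))))
        (acc, String.ofList (pvRot cs k))).1 =
        acc ++ (List.range r.length).map (fun j => String.ofList (pvRot cs (k + 1 + j))) := by
  intro r
  induction r with
  | nil => intro cs k acc _; simp
  | cons x xs ih =>
    intro cs k acc hk
    have hklt : k < cs.length := by simp at hk; omega
    rw [List.foldl_cons]
    rw [pvStep_eq cs k hklt _ String.toList_ofList]
    rw [ih cs (k + 1) (acc ++ [String.ofList (pvRot cs (k + 1))]) (by simp at hk ⊢; omega)]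
    rw [List.length_cons, List.range_succ_eq_map]
    simp only [List.map_cons, List.map_map, List.append_assoc, List.singleton_append,
      Function.comp_def, Nat.add_zero]
    congr 2
    apply List.map_congr_left
    intro j _
    congr 2
    omega

/-- B's entry `i` is rotation `i`. -/
lemma pvAlt_eq (string : String) :
    permute_cyclically_alt string =
      (List.range (if string.toList.length = 0 then 1 else string.toList.length)).map
        (fun k => String.ofList (pvRot string.toList k)) := by
  unfold permute_cyclically_alt
  simp only [PySem.Str.len_eq]
  have hsel : (if (string.toList.length : Int) = 0 then (1 : Int) else (string.toList.length : Int)) =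
      ((if string.toList.length = 0 then 1 else string.toList.length : Nat) : Int) := by
    split_ifs with h1 h2 h3 <;> simp_all
  rw [hsel, PySem.List.pyRange_zero_nat]
  rw [List.map_map]
  apply List.map_congr_left
  intro k hk
  simp only [Function.comp]
  rw [PySem.Chars.slice_eq_listSlice, PySem.Chars.slice_eq_listSlice]
  rw [PySem.List.slice_from _ (by positivity), PySem.List.slice_to _ (by positivity)]
  simp [pvRot]

-- ===== VERDICT (by name: the statement is the Claim_ definition above) =====
theorem permute_cyclically_spec : Claim_equal_permute_cyclically := by
  intro string _
  unfold Spec_permute_cyclically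
  rw [pvAlt_eq]
  unfold permute_cyclically
  simp only [PySem.Str.len_eq]
  by_cases h0 : string.toList.length = 0
  · rw [h0]
    rw [show ((0 : Nat) : Int) - 1 = -1 by norm_num]
    rw [PySem.List.pyRange_one_eq_nil (by norm_num)]
    simp [pvRot, String.ofList_toList]
  · obtain ⟨m, hm⟩ : ∃ m, string.toList.length = m + 1 := ⟨string.toList.length - 1, by omega⟩
    have hb : ((string.toList.length : Nat) : Int) - 1 = ((m : Nat) : Int) := by omega
    rw [hb, if_neg h0]
    have hinit : string = String.ofList (pvRot string.toList 0) := by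
      simp [pvRot, String.ofList_toList]
    conv_lhs => rw [hinit]
    rw [pvLoop (PySem.List.pyRange 0 (m : Int) 1) string.toList 0
      [String.ofList (pvRot string.toList 0)]
      (by rw [PySem.List.length_pyRange_one]; omega)]
    rw [PySem.List.length_pyRange_one]
    rw [show ((m : Int) - 0).toNat = m by omega]
    rw [hm, List.range_succ_eq_map]
    simp only [List.map_cons, List.map_map, Function.comp_def, List.singleton_append]
    congr 1
    apply List.map_congr_left
    intro j _
    congr 2
    omega
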